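-- pv_equiv track=rewrite | github.com/Giftedx/bot | src/data/osrs/fetcher.py | _parse_infobox
-- ===== SOURCE A (Python) =====
-- from typing import Dict, List, Optional, Any
--
-- def _parse_infobox(content: str) -> Dict[str, Any]:
--     """Parse an OSRS Wiki infobox template"""
--     infobox = {}
--     current_key = None
--     current_value = []
--
--     for line in content.split("\n"):
--         line = line.strip()
--         if not line:
--             continue
--
--         if line.startswith("|"):
--             if current_key and current_value:
--                 infobox[current_key] = "\n".join(current_value).strip()
--                 current_value = []
--
--             parts = line[1:].split("=", 1)
--             if len(parts) == 2:
--                 current_key = parts[0].strip()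
--                 current_value = [parts[1].strip()]
--             else:
--                 current_key = None
--         elif current_key:
--             current_value.append(line)
--
--     if current_key and current_value:
--         infobox[current_key] = "\n".join(current_value).strip()
--
--     return infobox
-- ===== SOURCE B (Python) =====
-- def _parse_infobox(content: str):
--     """Parse an OSRS Wiki infobox template (group lines first, then parse each group)."""
--     lines = [s for s in (l.strip() for l in content.split("\n")) if s]
--     # drop any lines before the first '|' header
--     while lines and not lines[0].startswith("|"):
--         lines = lines[1:]
--     infobox = {}
--     while lines:
--         header, lines = lines[0], lines[1:]
--         conts = []
--         while lines and not lines[0].startswith("|"):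
--             conts.append(lines[0])
--             lines = lines[1:]
--         parts = header[1:].split("=", 1)
--         if len(parts) == 2:
--             key = parts[0].strip()
--             if key:
--                 infobox[key] = "\n".join([parts[1].strip()] + conts).strip()
--     return infobox
-- ===== Notes on version B (the rewrite author's own statement) =====
-- stated objective: alternative
-- what changed: B replaces A's single stateful scan (current_key/current_value carried across lines with in-loop and post-loop flushes) by a two-phase decomposition: first clean and group the lines into header+continuation groups, then parse each group independently into the dict.
import Mathlib
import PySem

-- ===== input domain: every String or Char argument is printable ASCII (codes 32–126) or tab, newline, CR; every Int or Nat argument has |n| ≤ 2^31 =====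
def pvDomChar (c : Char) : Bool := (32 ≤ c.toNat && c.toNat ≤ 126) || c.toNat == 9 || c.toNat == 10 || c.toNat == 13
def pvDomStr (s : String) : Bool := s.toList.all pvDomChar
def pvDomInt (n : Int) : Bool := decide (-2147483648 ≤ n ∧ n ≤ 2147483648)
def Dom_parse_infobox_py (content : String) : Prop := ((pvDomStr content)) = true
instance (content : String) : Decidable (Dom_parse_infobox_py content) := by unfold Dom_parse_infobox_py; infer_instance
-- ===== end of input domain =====

-- B regroups the lines first (header + continuations) and parses each group in a second pass,
-- replacing A's stateful single scan; objective: alternative decomposition, same cost.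

-- ===== PORT A =====

def pvIsHeader (l : String) : Bool := PySem.Str.startswith l "|"

-- Python truthiness of current_key (None or '' is falsy)
def pvTruthyKey (ck : Option String) : Bool :=
  match ck with
  | none => false
  | some k => !(k = "")

-- the two flush lines A repeats: if current_key and current_value: infobox[ck] = "\n".join(cv).strip(); cv = []
def pvFlushA (st : PySem.Dict String String × Option String × List String) :
    PySem.Dict String String × Option String × List String :=
  let (infobox, ck, cv) := st
  if pvTruthyKey ck && !cv.isEmpty then
    (infobox.insert (ck.getD "") (PySem.Str.strip (PySem.Str.join "\n" cv)), ck, [])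
  else (infobox, ck, cv)

-- loop body after the strip / empty-skip (line is the stripped line)
def pvStepA2 (st : PySem.Dict String String × Option String × List String) (line : String) :
    PySem.Dict String String × Option String × List String :=
  if pvIsHeader line then
    let (infobox, _, cv) := pvFlushA st
    let parts := (PySem.Str.splitMax? (PySem.Str.slice line (some 1) none) "=" 1).getD []
    match parts with
    | [p0, p1] => (infobox, some (PySem.Str.strip p0), [PySem.Str.strip p1])
    | _ => (infobox, none, cv)
  else if pvTruthyKey st.2.1 then (st.1, st.2.1, st.2.2 ++ [line])
  else st

-- loop body: line = line.strip(); if not line: continue; …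
def pvStepA (st : PySem.Dict String String × Option String × List String) (rawLine : String) :
    PySem.Dict String String × Option String × List String :=
  let line := PySem.Str.strip rawLine
  if line = "" then st else pvStepA2 st line

def parse_infobox_py (content : String) : List (String × String) :=
  let st := ((PySem.Str.split? content "\n").getD []).foldl pvStepA
              ((PySem.Dict.empty : PySem.Dict String String), (none : Option String), ([] : List String))
  (pvFlushA st).1.items

-- ===== PORT B =====

def pvNotHeader (l : String) : Bool := !(pvIsHeader l)

set_option maxHeartbeats 1000000 in
def pvParseGroups (lines : List String) (infobox : PySem.Dict String String) :
    PySem.Dict String String :=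
  match lines with
  | [] => infobox
  | header :: rest =>
    let conts := rest.takeWhile pvNotHeader
    let rest' := rest.dropWhile pvNotHeader
    let parts := (PySem.Str.splitMax? (PySem.Str.slice header (some 1) none) "=" 1).getD []
    let infobox' :=
      match parts with
      | [p0, p1] =>
        let key := PySem.Str.strip p0
        if key = "" then infobox
        else infobox.insert key
               (PySem.Str.strip (PySem.Str.join "\n" (PySem.Str.strip p1 :: conts)))
      | _ => infobox
    pvParseGroups rest' infobox'
termination_by lines.length
decreasing_by
  simp only [List.length_cons]
  have := List.length_dropWhile_le pvNotHeader rest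
  omega

def parse_infobox_py_alt (content : String) : List (String × String) :=
  let lines := (((PySem.Str.split? content "\n").getD []).map PySem.Str.strip).filter (fun s => ¬ s = "")
  (pvParseGroups (lines.dropWhile pvNotHeader) PySem.Dict.empty).items

-- ===== PRECONDITION & SPEC =====
def Spec_parse_infobox_py (content : String) (out : List (String × String)) : Prop := out = parse_infobox_py_alt content
instance (content : String) (out : List (String × String)) : Decidable (Spec_parse_infobox_py content out) := by unfold Spec_parse_infobox_py; infer_instance

-- ===== CLAIM (what is proved, stated in full; the proofs are below) =====
def Claim_equal_parse_infobox_py : Prop := ∀ (content : String), Dom_parse_infobox_py content → Spec_parse_infobox_py content (parse_infobox_py content)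

-- ===== LEMMAS AND PROOFS =====

-- stripping and dropping empty lines up front is the same as doing it per iteration
theorem pv_foldl_clean (ls : List String)
    (st : PySem.Dict String String × Option String × List String) :
    ls.foldl pvStepA st
      = (((ls.map PySem.Str.strip).filter (fun s => ¬ s = "")).foldl pvStepA2 st) := by
  induction ls generalizing st with
  | nil => rfl
  | cons l t ih =>
    simp only [List.foldl_cons, List.map_cons, List.filter_cons]
    by_cases h : PySem.Str.strip l = ""
    · simp [pvStepA, h, ih]
    · simp [pvStepA, h, ih]

-- the main invariant: A's stateful scan equals B's group pass, for the three reachable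
-- shapes of A's state (key None / key '' / truthy key with its pending value list)
set_option maxHeartbeats 2000000 in
theorem pv_main (ls : List String) :
    (∀ d v, (pvFlushA (ls.foldl pvStepA2 (d, none, v))).1
        = pvParseGroups (ls.dropWhile pvNotHeader) d)
    ∧ (∀ d v, (pvFlushA (ls.foldl pvStepA2 (d, some "", v))).1
        = pvParseGroups (ls.dropWhile pvNotHeader) d)
    ∧ (∀ d k v, ¬ k = "" → v ≠ [] →
        (pvFlushA (ls.foldl pvStepA2 (d, some k, v))).1
          = pvParseGroups (ls.dropWhile pvNotHeader)
              (d.insert k (PySem.Str.strip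
                (PySem.Str.join "\n" (v ++ ls.takeWhile pvNotHeader))))) := by
  induction ls with
  | nil =>
    refine ⟨fun d v => ?_, fun d v => ?_, fun d k v hk hv => ?_⟩
    · rw [pvParseGroups.eq_def]
      simp [pvFlushA, pvTruthyKey]
    · rw [pvParseGroups.eq_def]
      simp [pvFlushA, pvTruthyKey]
    · rw [pvParseGroups.eq_def]
      simp [pvFlushA, pvTruthyKey, hk, hv]
  | cons l t ih =>
    obtain ⟨ih1, ih2, ih3⟩ := ih
    by_cases hl : pvIsHeader l = true
    · -- l is a header line
      have hdw : (l :: t).dropWhile pvNotHeader = l :: t := by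
        simp [pvNotHeader, hl]
      have htw : (l :: t).takeWhile pvNotHeader = [] := by
        simp [pvNotHeader, hl]
      have hpg : pvParseGroups (l :: t) = fun d =>
          pvParseGroups (t.dropWhile pvNotHeader)
            (match (PySem.Str.splitMax? (PySem.Str.slice l (some 1) none) "=" 1).getD [] with
             | [p0, p1] =>
               if PySem.Str.strip p0 = "" then d
               else d.insert (PySem.Str.strip p0)
                 (PySem.Str.strip (PySem.Str.join "\n"
                   (PySem.Str.strip p1 :: t.takeWhile pvNotHeader)))
             | _ => d) := by
        funext d
        rw [pvParseGroups.eq_def]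
      -- processing the header line from any state st: flush, then re-key from the split
      have estep : ∀ st : PySem.Dict String String × Option String × List String,
          pvStepA2 st l =
            (match (PySem.Str.splitMax? (PySem.Str.slice l (some 1) none) "=" 1).getD [] with
             | [p0, p1] => ((pvFlushA st).1, some (PySem.Str.strip p0), [PySem.Str.strip p1])
             | _ => ((pvFlushA st).1, none, (pvFlushA st).2.2)) := by
        intro st
        rcases hfs : pvFlushA st with ⟨d1, ck1, cv1⟩
        simp only [pvStepA2, hl, if_true, hfs]
      -- the whole cons step from any state st
      have step : ∀ st : PySem.Dict String String × Option String × List String,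
          (pvFlushA ((l :: t).foldl pvStepA2 st)).1
            = pvParseGroups (t.dropWhile pvNotHeader)
              (match (PySem.Str.splitMax? (PySem.Str.slice l (some 1) none) "=" 1).getD [] with
               | [p0, p1] =>
                 if PySem.Str.strip p0 = "" then (pvFlushA st).1
                 else (pvFlushA st).1.insert (PySem.Str.strip p0)
                   (PySem.Str.strip (PySem.Str.join "\n"
                     (PySem.Str.strip p1 :: t.takeWhile pvNotHeader)))
               | _ => (pvFlushA st).1) := by
        intro st
        rw [List.foldl_cons, estep st]
        cases hp : (PySem.Str.splitMax? (PySem.Str.slice l (some 1) none) "=" 1).getD [] with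
        | nil => exact ih1 _ _
        | cons p0 ps =>
          cases ps with
          | nil => exact ih1 _ _
          | cons p1 ps' =>
            cases ps' with
            | nil =>
              by_cases hk : PySem.Str.strip p0 = ""
              · simp only [hk]
                rw [if_pos trivial]
                exact ih2 _ _
              · simp only [if_neg hk]
                exact ih3 (pvFlushA st).1 (PySem.Str.strip p0) [PySem.Str.strip p1] hk
                  (by simp)
            | cons _ _ => exact ih1 _ _
      refine ⟨fun d v => ?_, fun d v => ?_, fun d k v hk hv => ?_⟩
      · rw [hdw, hpg, step (d, none, v)]
        have hf : (pvFlushA (d, none, v)).1 = d := by simp [pvFlushA, pvTruthyKey]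
        rw [hf]
      · rw [hdw, hpg, step (d, some "", v)]
        have hf : (pvFlushA (d, some "", v)).1 = d := by simp [pvFlushA, pvTruthyKey]
        rw [hf]
      · rw [hdw, hpg, htw, step (d, some k, v)]
        have hf : (pvFlushA (d, some k, v)).1
            = d.insert k (PySem.Str.strip (PySem.Str.join "\n" v)) := by
          simp [pvFlushA, pvTruthyKey, hk, hv]
        rw [hf]
        simp
    · -- l is a continuation (non-header) line
      have hdw : (l :: t).dropWhile pvNotHeader = t.dropWhile pvNotHeader := by
        simp [pvNotHeader, hl]
      have htw : (l :: t).takeWhile pvNotHeader = l :: t.takeWhile pvNotHeader := by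
        simp [pvNotHeader, hl]
      refine ⟨fun d v => ?_, fun d v => ?_, fun d k v hk hv => ?_⟩
      · rw [hdw]
        simpa [pvStepA2, hl, pvTruthyKey] using ih1 d v
      · rw [hdw]
        simpa [pvStepA2, hl, pvTruthyKey] using ih2 d v
      · rw [hdw]
        have : pvStepA2 (d, some k, v) l = (d, some k, v ++ [l]) := by
          simp [pvStepA2, hl, pvTruthyKey, hk]
        rw [List.foldl_cons, this]
        rw [ih3 d k (v ++ [l]) hk (by simp), htw]
        simp

-- ===== VERDICT (by name: the statement is the Claim_ definition above) =====
theorem parse_infobox_py_spec : Claim_equal_parse_infobox_py := by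
  intro content _
  show parse_infobox_py content = parse_infobox_py_alt content
  unfold parse_infobox_py parse_infobox_py_alt
  rw [pv_foldl_clean]
  exact congrArg PySem.Dict.items ((pv_main _).1 PySem.Dict.empty [])
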